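-- pv_equiv track=rewrite | github.com/0xIffy/Carleton | 1---/COMP/1405/assignments/a5/ascii_fill.py | boardFinished
-- ===== SOURCE A (Python) =====
-- def boardFinished(board):
-- 	'''Receives: The 2D list of the board
-- 		 Does: Checks if the board has been complete by seeing if there are still multiple symbols on the board
-- 		 Returns: True if there is only one symbol on the board and false otherwise'''
--
--
-- 	symbols = ['&','@','#','%']						# List of all possible symbols that could be on the board
--
--
-- 	for row in board:
-- 		count = 0														# Variable to count the amount of symbols present in a single row
--
-- 		for sym in symbols:
-- 			# Adds one to count if a specific variable is present in a row
-- 			if sym in row: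
-- 				count+=1
--
-- 		if count > 1:
-- 			return False
--
-- 	else:
-- 		return True
-- ===== SOURCE B (Python) =====
-- def boardFinished(board):
--     '''Same contract as A: True iff no board row contains more than one
--     distinct allowed symbol. Single scan over each row's cells maintaining
--     a set of seen symbols, bailing out as soon as a second one appears.'''
--     allowed = ('&', '@', '#', '%')
--     for row in board:
--         seen = set()
--         for cell in row:
--             if cell in allowed:
--                 seen.add(cell)
--                 if len(seen) > 1:
--                     return False
--     return True
-- ===== Notes on version B (the rewrite author's own statement) =====
-- stated objective: idiomatic
-- what changed: Instead of probing each of the four fixed symbols against the row with `in` (a hidden scan of the row per symbol) and counting hits, B makes a single pass over the row's cells, accumulating the distinct allowed symbols in a set and returning False the moment a second one is seen.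
import Mathlib
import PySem

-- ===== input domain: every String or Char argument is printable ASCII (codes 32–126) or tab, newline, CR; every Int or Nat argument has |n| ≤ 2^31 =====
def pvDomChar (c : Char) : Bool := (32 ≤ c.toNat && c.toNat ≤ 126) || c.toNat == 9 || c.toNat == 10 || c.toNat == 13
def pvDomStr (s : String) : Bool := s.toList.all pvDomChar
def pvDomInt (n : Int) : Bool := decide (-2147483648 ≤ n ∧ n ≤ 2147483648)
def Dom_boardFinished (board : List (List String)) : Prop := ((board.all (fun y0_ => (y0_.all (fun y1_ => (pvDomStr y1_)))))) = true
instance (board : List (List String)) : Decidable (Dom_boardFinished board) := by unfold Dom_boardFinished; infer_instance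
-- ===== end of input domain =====

-- B replaces A's four per-symbol membership probes of each row by one pass over the
-- row's cells with a set of seen symbols and an immediate False on the second one (idiomatic).

-- ===== PORT A =====
-- for each row, count how many of the four fixed symbols occur in it ('sym in row');
-- return False at the first row with count > 1, True after the loop.
def boardFinished : List (List String) → Bool
  | [] => true
  | row :: rest =>
    let count := ["&", "@", "#", "%"].foldl
      (fun c sym => if row.contains sym then c + 1 else c) (0 : Int)
    if count > 1 then false else boardFinished rest

-- ===== PORT B =====
def bfAllowed (c : String) : Bool := c == "&" || c == "@" || c == "#" || c == "%"

-- inner loop of B: scan the row's cells, adding allowed ones to `seen`,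
-- returning false as soon as len(seen) > 1.
def bfRowScan : List String → PySem.Set String → Bool
  | [], _ => true
  | c :: rest, seen =>
    if bfAllowed c then
      let seen' := PySem.Set.add seen c
      if PySem.Set.len seen' > 1 then false else bfRowScan rest seen'
    else bfRowScan rest seen

def boardFinished_alt : List (List String) → Bool
  | [] => true
  | row :: rest =>
    if bfRowScan row PySem.Set.empty then boardFinished_alt rest else false

-- ===== PRECONDITION & SPEC =====
def Spec_boardFinished (board : List (List String)) (out : Bool) : Prop := out = boardFinished_alt board
instance (board : List (List String)) (out : Bool) : Decidable (Spec_boardFinished board out) := by unfold Spec_boardFinished; infer_instance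

-- ===== CLAIM (what is proved, stated in full; the proofs are below) =====
def Claim_equal_boardFinished : Prop := ∀ (board : List (List String)), Dom_boardFinished board → Spec_boardFinished board (boardFinished board)

-- ===== LEMMAS AND PROOFS =====

-- the set of allowed symbols accumulated by B's inner loop over a row
def bfSet (row : List String) (s : PySem.Set String) : PySem.Set String :=
  row.foldl (fun t c => if bfAllowed c then PySem.Set.add t c else t) s

theorem bfSet_mono (row : List String) (s : PySem.Set String) :
    s.length ≤ (bfSet row s).length := by
  induction row generalizing s with
  | nil => simp [bfSet]
  | cons c rest ih =>
    simp only [bfSet, List.foldl_cons]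
    by_cases h : bfAllowed c = true
    · simp only [h, if_true]
      refine le_trans ?_ (ih (PySem.Set.add s c))
      simp only [PySem.Set.add]
      split <;> simp
    · simp only [if_neg h]
      exact ih s

theorem bfSet_mem (row : List String) (s : PySem.Set String) (x : String) :
    x ∈ bfSet row s ↔ x ∈ s ∨ (bfAllowed x = true ∧ x ∈ row) := by
  induction row generalizing s with
  | nil => simp [bfSet]
  | cons c rest ih =>
    simp only [bfSet, List.foldl_cons]
    by_cases h : bfAllowed c = true
    · simp only [h, if_true]
      rw [show List.foldl (fun t c => if bfAllowed c = true then PySem.Set.add t c else t)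
            (PySem.Set.add s c) rest = bfSet rest (PySem.Set.add s c) from rfl, ih]
      rw [PySem.Set.mem_add]
      constructor
      · rintro ((hs | rfl) | ⟨ha, hr⟩)
        · exact Or.inl hs
        · exact Or.inr ⟨h, List.mem_cons_self ..⟩
        · exact Or.inr ⟨ha, List.mem_cons_of_mem _ hr⟩
      · rintro (hs | ⟨ha, hr⟩)
        · exact Or.inl (Or.inl hs)
        · rcases List.mem_cons.mp hr with rfl | hr
          · exact Or.inl (Or.inr rfl)
          · exact Or.inr ⟨ha, hr⟩
    · simp only [if_neg h]
      rw [show List.foldl (fun t c => if bfAllowed c = true then PySem.Set.add t c else t)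
            s rest = bfSet rest s from rfl, ih]
      constructor
      · rintro (hs | ⟨ha, hr⟩)
        · exact Or.inl hs
        · exact Or.inr ⟨ha, List.mem_cons_of_mem _ hr⟩
      · rintro (hs | ⟨ha, hr⟩)
        · exact Or.inl hs
        · rcases List.mem_cons.mp hr with rfl | hr
          · exact absurd ha h
          · exact Or.inr ⟨ha, hr⟩

theorem bfSet_nodup (row : List String) (s : PySem.Set String) (hs : s.Nodup) :
    (bfSet row s).Nodup := by
  induction row generalizing s with
  | nil => simpa [bfSet] using hs
  | cons c rest ih =>
    simp only [bfSet, List.foldl_cons]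
    by_cases h : bfAllowed c = true
    · simp only [h, if_true]
      exact ih _ (PySem.Set.nodup_add s c hs)
    · simp only [if_neg h]
      exact ih _ hs

-- B's inner loop returns true iff the final seen-set stays within one element
theorem bfRowScan_spec (row : List String) (s : PySem.Set String) (hs : s.length ≤ 1) :
    bfRowScan row s = decide ((bfSet row s).length ≤ 1) := by
  induction row generalizing s with
  | nil => simp [bfRowScan, bfSet, hs]
  | cons c rest ih =>
    simp only [bfRowScan, bfSet, List.foldl_cons]
    by_cases h : bfAllowed c = true
    · simp only [h, if_true]
      by_cases hlen : PySem.Set.len (PySem.Set.add s c) > 1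
      · simp only [hlen, if_true]
        have h2 : 2 ≤ (PySem.Set.add s c).length := by
          simp only [PySem.Set.len] at hlen; omega
        have := bfSet_mono rest (PySem.Set.add s c)
        rw [show List.foldl (fun t c => if bfAllowed c = true then PySem.Set.add t c else t)
              (PySem.Set.add s c) rest = bfSet rest (PySem.Set.add s c) from rfl]
        have : ¬ (bfSet rest (PySem.Set.add s c)).length ≤ 1 := by omega
        simp [this]
      · simp only [hlen, if_false]
        have h1 : (PySem.Set.add s c).length ≤ 1 := by
          simp only [PySem.Set.len] at hlen; omega
        exact ih _ h1
    · simp only [if_neg h]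
      exact ih _ hs

-- A's per-row count equals the size of B's seen-set for that row
theorem bfCount_eq (row : List String) :
    (["&", "@", "#", "%"].filter (fun sym => row.contains sym)).length
      = (bfSet row PySem.Set.empty).length := by
  have hperm : (["&", "@", "#", "%"].filter (fun sym => row.contains sym)).Perm
      (bfSet row PySem.Set.empty) := by
    rw [List.perm_ext_iff_of_nodup]
    · intro x
      rw [List.mem_filter, bfSet_mem]
      simp only [PySem.Set.empty, List.not_mem_nil, false_or]
      constructor
      · rintro ⟨hm, hc⟩
        refine ⟨?_, List.contains_iff_mem.mp hc⟩
        simp only [bfAllowed]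
        fin_cases hm <;> simp
      · rintro ⟨ha, hr⟩
        refine ⟨?_, List.contains_iff_mem.mpr hr⟩
        simp only [bfAllowed, Bool.or_eq_true, beq_iff_eq] at ha
        rcases ha with ((rfl | rfl) | rfl) | rfl <;> simp
    · exact List.Nodup.filter _ (by decide)
    · exact bfSet_nodup row PySem.Set.empty List.nodup_nil
  exact hperm.length_eq

-- ===== VERDICT (by name: the statement is the Claim_ definition above) =====
theorem bf_eq (board : List (List String)) : boardFinished board = boardFinished_alt board := by
  induction board with
  | nil => rfl
  | cons row rest ih =>
    simp only [boardFinished, boardFinished_alt]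
    rw [PySem.List.foldl_count_if, List.countP_eq_length_filter, bfCount_eq,
        bfRowScan_spec row PySem.Set.empty (by simp [PySem.Set.empty])]
    set n := (bfSet row PySem.Set.empty).length with hn
    by_cases h : n ≤ 1
    · rw [if_neg (show ¬ ((0 : Int) + (n : Int) > 1) by omega),
          if_pos (decide_eq_true h)]
      exact ih
    · rw [if_pos (show (0 : Int) + (n : Int) > 1 by omega),
          if_neg (by simp [h])]

theorem boardFinished_spec : Claim_equal_boardFinished := by
  intro board _
  unfold Spec_boardFinished
  exact bf_eq board
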